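-- pv_equiv track=rewrite | github.com/NLP-Discourse-SoochowU/rst_dp2019 | utils/text_process_util.py | get_word_syns
-- ===== SOURCE A (Python) =====
-- s_list = [',', '.', ':', ';', '!', '?', '-', '*', '\'', '`', '_', '\"', '(', ')', '{', '}', '[', ']', '<', '>',
--           '¨', '"', '||', '/', '&', '~', '$', '\\', '#', '%']
--
-- def get_word_syns(token):
--     """
--     对一个token周围的符号切割得到保函符号和当前word的列表
--     对 's的切割 以 's为单位
--     :param token:
--     :return:
--     """
--     token_list = []
--     temp_list = []
--     char_front_idx = 0
--     char_last_idx = -1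
--     while char_front_idx < len(token) and (token[char_front_idx] in s_list):
--         token_list.append(token[char_front_idx])
--         char_front_idx += 1
--     while char_last_idx >= -len(token) and (token[char_last_idx] in s_list) and (char_front_idx < len(token)):
--         temp_list.insert(0, token[char_last_idx])
--         char_last_idx -= 1
--     if char_last_idx == -1:
--         word = token[char_front_idx:]
--         if len(word) > 0:
--             token_list.append(word)
--     else:
--         word = token[char_front_idx:char_last_idx + 1]
--         token_list.append(word)
--         while char_last_idx + 1 <= -1:
--             token_list.append(token[char_last_idx + 1])
--             char_last_idx += 1
--     token_list_final = []
--     for token_ in token_list: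
--         if token_.endswith("'s") or token_.endswith("'m") or token_.endswith("'S") or token_.endswith("'d"):
--             token_list_final.append(token_[:-2])
--             token_list_final.append(token_[-2:])
--         elif token_.endswith("'t") or token_.endswith("'re") or token_.endswith("'ll") or token_.endswith("'ve"):
--             token_list_final.append(token_[:-3])
--             token_list_final.append(token_[-3:])
--         elif token_ == "cannot":
--             token_list_final.append("can")
--             token_list_final.append("not")
--         else:
--             token_list_final.append(token_)
--     return token_list_final
-- ===== SOURCE B (Python) =====
-- s_list = [',', '.', ':', ';', '!', '?', '-', '*', '\'', '`', '_', '\"', '(', ')', '{', '}', '[', ']', '<', '>',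
--           '¨', '"', '||', '/', '&', '~', '$', '\\', '#', '%']
--
-- PUNCTS = frozenset(s for s in s_list if len(s) == 1)
--
-- def _split_contraction(word):
--     if word.endswith(("'s", "'m", "'S", "'d")):
--         return [word[:-2], word[-2:]]
--     if word.endswith(("'t", "'re", "'ll", "'ve")):
--         return [word[:-3], word[-3:]]
--     if word == "cannot":
--         return ["can", "not"]
--     return [word]
--
-- def get_word_syns(token):
--     # one forward pass: leading puncts, word chars (with interior puncts
--     # flushed from 'pend' when a later word char appears), trailing puncts
--     lead, mid, pend = [], [], []
--     for ch in token:
--         if ch in PUNCTS: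
--             (pend if mid else lead).append(ch)
--         else:
--             mid.extend(pend)
--             pend.clear()
--             mid.append(ch)
--     out = list(lead)
--     if mid:
--         out.extend(_split_contraction(''.join(mid)))
--     out.extend(pend)
--     return out
-- ===== Notes on version B (the rewrite author's own statement) =====
-- stated objective: simpler
-- what changed: A's four index-juggling while-loops (negative indices, an unused temp_list, a three-way branch) plus a final re-splitting pass over every piece are replaced by a single forward pass with a lead/mid/pend accumulator state machine, with the contraction split applied once to the joined core word.
import Mathlib
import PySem

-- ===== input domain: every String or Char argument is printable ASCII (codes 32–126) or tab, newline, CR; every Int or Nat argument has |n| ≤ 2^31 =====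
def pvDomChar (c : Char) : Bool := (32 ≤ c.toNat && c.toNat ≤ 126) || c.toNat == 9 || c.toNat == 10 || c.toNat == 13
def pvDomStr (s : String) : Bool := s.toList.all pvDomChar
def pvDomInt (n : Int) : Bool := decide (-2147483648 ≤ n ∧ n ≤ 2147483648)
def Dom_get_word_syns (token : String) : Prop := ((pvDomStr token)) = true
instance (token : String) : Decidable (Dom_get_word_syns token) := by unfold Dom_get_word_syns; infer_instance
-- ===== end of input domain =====

-- B replaces A's four index-juggling while-loops (negative indices, unused temp_list,
-- three-way branch, final re-splitting pass over all pieces) by ONE forward pass with a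
-- lead/mid/pend accumulator state machine; the contraction split runs once, on the core word.

-- the module-level s_list constant (shared by both Pythons)
def pvSList : List String := [",", ".", ":", ";", "!", "?", "-", "*", "'", "`", "_", "\"", "(", ")", "{", "}", "[", "]", "<", ">", "¨", "\"", "||", "/", "&", "~", "$", "\\", "#", "%"]

-- ===== PORT A =====
-- token[i] in s_list  (token[i] is a one-character string)
def pvMemA (c : Char) : Bool := pvSList.contains (String.ofList [c])

-- first while loop: appends each leading punctuation char, advances char_front_idx
def pvFrontA (cs : List Char) (acc : List String) (i : Nat) : List String × Nat :=
  if h : i < cs.length then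
    if pvMemA cs[i] then pvFrontA cs (acc ++ [String.ofList [cs[i]]]) (i + 1) else (acc, i)
  else (acc, i)
termination_by cs.length - i

-- second while loop; it also fills temp_list, which A never reads, so only the final
-- char_last_idx is returned
def pvBackA (cs : List Char) (front : Nat) (j : Int) : Int :=
  if h : -(cs.length : Int) ≤ j ∧ ((match PySem.List.pyGet? cs j with | some c => pvMemA c | none => false) = true) ∧ front < cs.length then
    pvBackA cs front (j - 1)
  else j
termination_by (j + cs.length + 1).toNat
decreasing_by omega

-- final while loop of the else branch: append token[char_last_idx+1] one by one
-- (the index is always in range when this loop runs, so the pyGetD default is never used)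
def pvTrailA (cs : List Char) (acc : List String) (j : Int) : List String :=
  if h : j + 1 ≤ -1 then
    pvTrailA cs (acc ++ [String.ofList [PySem.List.pyGetD cs (j + 1) ' ']]) (j + 1)
  else acc
termination_by (-j).toNat
decreasing_by omega

-- body of the 'for token_ in token_list' loop
def pvSplitA (acc : List String) (t : String) : List String :=
  if PySem.Str.endswith t "'s" || PySem.Str.endswith t "'m" || PySem.Str.endswith t "'S" || PySem.Str.endswith t "'d" then
    acc ++ [String.ofList (PySem.List.slice t.toList none (some (-2)))] ++ [String.ofList (PySem.List.slice t.toList (some (-2)) none)]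
  else if PySem.Str.endswith t "'t" || PySem.Str.endswith t "'re" || PySem.Str.endswith t "'ll" || PySem.Str.endswith t "'ve" then
    acc ++ [String.ofList (PySem.List.slice t.toList none (some (-3)))] ++ [String.ofList (PySem.List.slice t.toList (some (-3)) none)]
  else if t == "cannot" then
    acc ++ ["can"] ++ ["not"]
  else
    acc ++ [t]

def get_word_syns (token : String) : List String :=
  let cs := token.toList
  let fr := pvFrontA cs [] 0
  let token_list := fr.1
  let char_front_idx := fr.2
  let char_last_idx := pvBackA cs char_front_idx (-1)
  let token_list :=
    if char_last_idx = -1 then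
      let word := String.ofList (PySem.List.slice cs (some (char_front_idx : Int)) none)
      if word.length > 0 then token_list ++ [word] else token_list
    else
      let word := String.ofList (PySem.List.slice cs (some (char_front_idx : Int)) (some (char_last_idx + 1)))
      pvTrailA cs (token_list ++ [word]) char_last_idx
  token_list.foldl pvSplitA []

-- ===== PORT B =====
-- PUNCTS = frozenset(s for s in s_list if len(s) == 1)
def pvPunctsB : PySem.Set String := PySem.Set.ofList (pvSList.filter (fun s => s.length == 1))

-- ch in PUNCTS  (ch is a one-character string)
def pvMemB (c : Char) : Bool := PySem.Set.contains pvPunctsB (String.ofList [c])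

-- _split_contraction
def pvSplitB (p : String) : List String :=
  if PySem.Str.endswith p "'s" || PySem.Str.endswith p "'m" || PySem.Str.endswith p "'S" || PySem.Str.endswith p "'d" then
    [String.ofList (PySem.List.slice p.toList none (some (-2))), String.ofList (PySem.List.slice p.toList (some (-2)) none)]
  else if PySem.Str.endswith p "'t" || PySem.Str.endswith p "'re" || PySem.Str.endswith p "'ll" || PySem.Str.endswith p "'ve" then
    [String.ofList (PySem.List.slice p.toList none (some (-3))), String.ofList (PySem.List.slice p.toList (some (-3)) none)]
  else if p == "cannot" then
    ["can", "not"]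
  else
    [p]

-- loop body: state = (lead, mid, pend)
def pvStepB (st : List String × List Char × List Char) (ch : Char) : List String × List Char × List Char :=
  if pvMemB ch then
    if st.2.1 ≠ [] then (st.1, st.2.1, st.2.2 ++ [ch]) else (st.1 ++ [String.ofList [ch]], st.2.1, st.2.2)
  else (st.1, st.2.1 ++ st.2.2 ++ [ch], [])

def get_word_syns_alt (token : String) : List String :=
  let st := token.toList.foldl pvStepB ([], [], [])
  st.1 ++ (if st.2.1 ≠ [] then pvSplitB (String.ofList st.2.1) else []) ++ st.2.2.map (fun c => String.ofList [c])

-- ===== PRECONDITION & SPEC =====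
def Spec_get_word_syns (token : String) (out : List String) : Prop := out = get_word_syns_alt token
instance (token : String) (out : List String) : Decidable (Spec_get_word_syns token out) := by unfold Spec_get_word_syns; infer_instance

-- ===== CLAIM (what is proved, stated in full; the proofs are below) =====
def Claim_equal_get_word_syns : Prop := ∀ (token : String), Dom_get_word_syns token → Spec_get_word_syns token (get_word_syns token)

-- ===== LEMMAS AND PROOFS =====

theorem pvMemB_eq : pvMemB = pvMemA := by
  funext c
  simp only [pvMemB, pvMemA, pvPunctsB, PySem.Set.contains, List.contains_eq_mem]
  rw [decide_eq_decide, PySem.Set.mem_ofList, List.mem_filter]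
  simp [String.length_ofList]

def pvSing (c : Char) : String := String.ofList [c]

-- leading-punctuation length and trailing-punctuation length of a char list
def pvF (cs : List Char) : Nat := (cs.takeWhile pvMemA).length
def pvT (cs : List Char) : Nat := (cs.reverse.takeWhile pvMemA).length

-- the canonical pieces list both programs produce before contraction splitting
def pvPieces (cs : List Char) : List String :=
  if pvF cs = cs.length then cs.map pvSing
  else
    (cs.takeWhile pvMemA).map pvSing
    ++ [String.ofList ((cs.drop (pvF cs)).take (cs.length - pvT cs - pvF cs))]
    ++ (cs.drop (cs.length - pvT cs)).map pvSing

theorem pvGetElem_idx_eq (cs : List Char) {a b : Nat} (h : a = b) (ha : a < cs.length) :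
    cs[a] = cs[b]'(h ▸ ha) := by
  subst h
  rfl

theorem pvFrontA_eq (cs : List Char) : ∀ (acc : List String) (i : Nat),
    pvFrontA cs acc i = (acc ++ ((cs.drop i).takeWhile pvMemA).map pvSing, i + ((cs.drop i).takeWhile pvMemA).length) := by
  intro acc i
  fun_induction pvFrontA cs acc i with
  | case1 acc i h hp ih =>
      rw [ih, List.drop_eq_getElem_cons h, List.takeWhile_cons, hp]
      simp [pvSing]
      omega
  | case2 acc i h hp =>
      have hp' : pvMemA cs[i] = false := by simpa using hp
      rw [List.drop_eq_getElem_cons h, List.takeWhile_cons, hp']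
      simp
  | case3 acc i h =>
      rw [List.drop_eq_nil_iff.mpr (by omega)]
      simp

theorem pvTakeWhile_getElem {p : Char → Bool} {cs : List Char} {i : Nat}
    (h : i < (cs.takeWhile p).length) (h' : i < cs.length) : p cs[i] = true := by
  induction cs generalizing i with
  | nil => simp at h'
  | cons c cs ih =>
      cases hp : p c with
      | false => rw [List.takeWhile_cons, hp] at h; simp at h
      | true =>
          cases i with
          | zero => simpa using hp
          | succ i =>
              rw [List.takeWhile_cons, hp] at h
              simp only [List.getElem_cons_succ]
              exact ih (by simpa using h) (by simpa using h')

theorem pvTakeWhile_boundary {p : Char → Bool} {cs : List Char}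
    (h : (cs.takeWhile p).length < cs.length) : p (cs[(cs.takeWhile p).length]'h) = false := by
  induction cs with
  | nil => simp at h
  | cons c cs ih =>
      cases hp : p c with
      | false => simp [hp]
      | true =>
          have h' : (cs.takeWhile p).length < cs.length := by
            rw [List.takeWhile_cons, hp] at h; simpa using h
          have hx := ih h'
          have hidx : (List.takeWhile p (c :: cs)).length = (cs.takeWhile p).length + 1 := by
            rw [List.takeWhile_cons, hp]; simp
          rw [pvGetElem_idx_eq (c :: cs) hidx (by omega)]
          simpa using hx

theorem pvNegGet (cs : List Char) (k : Nat) (h : k < cs.length) :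
    PySem.List.pyGet? cs (-(k : Int) - 1) = some (cs.getD (cs.length - (k + 1)) ' ') := by
  rw [List.getD_eq_getElem cs ' ' (show cs.length - (k + 1) < cs.length by omega)]
  have harg : (-(k : Int) - 1) = (-((k : Int) + 1)) := by ring
  rw [harg]
  simp [PySem.List.pyGet?, PySem.List.pyIdx?, show ¬((k:Int) ≤ -1) by omega, h]

theorem pvBackA_eq (cs : List Char) (front : Nat) (hf : front < cs.length)
    (hnp : pvMemA (cs.getD front ' ') = false) :
    ∀ (k : Nat), front + k < cs.length →
      pvBackA cs front (-(k : Int) - 1) = -(((cs.reverse.drop k).takeWhile pvMemA).length : Int) - k - 1 := by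
  suffices H : ∀ (m k : Nat), cs.length - k ≤ m → front + k < cs.length →
      pvBackA cs front (-(k : Int) - 1) = -(((cs.reverse.drop k).takeWhile pvMemA).length : Int) - k - 1 from
    fun k hk => H cs.length k (by omega) hk
  intro m
  induction m with
  | zero => intro k hm hk; omega
  | succ m ih =>
      intro k hm hk
      have hkl : k < cs.length := by omega
      have hget := pvNegGet cs k hkl
      have hrev : cs.reverse.drop k = cs.getD (cs.length - (k + 1)) ' ' :: cs.reverse.drop (k + 1) := by
        rw [List.drop_eq_getElem_cons (show k < cs.reverse.length by simpa using hkl),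
          List.getElem_reverse, List.getD_eq_getElem cs ' ' (show cs.length - (k + 1) < cs.length by omega)]
        rw [pvGetElem_idx_eq cs (show cs.length - 1 - k = cs.length - (k + 1) by omega) (by omega)]
      rw [pvBackA]
      cases hp : pvMemA (cs.getD (cs.length - (k + 1)) ' ') with
      | false =>
          rw [dif_neg (by rw [hget]; simp [← List.getD_eq_getElem?_getD, hp])]
          rw [hrev, List.takeWhile_cons, hp]
          simp
      | true =>
          have hne : cs.length - (k + 1) ≠ front := by
            intro hcontra
            rw [hcontra, hnp] at hp
            exact Bool.false_ne_true hp
          have hk1 : front + (k + 1) < cs.length := by omega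
          rw [dif_pos (by refine ⟨by omega, ?_, hf⟩; rw [hget]; simpa using hp)]
          have harg : -(k : Int) - 1 - 1 = -((k + 1 : Nat) : Int) - 1 := by push_cast; ring
          rw [harg, ih (k + 1) (by omega) hk1]
          rw [hrev, List.takeWhile_cons, hp]
          simp
          ring

theorem pvNegGetD (cs : List Char) (t : Nat) (h1 : 1 ≤ t) (h2 : t ≤ cs.length) :
    PySem.List.pyGetD cs (-(t : Int)) ' ' = cs.getD (cs.length - t) ' ' := by
  have harg : (-(t : Int)) = (-((t - 1 : Nat) : Int) - 1) := by push_cast [h1]; ring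
  rw [harg]
  unfold PySem.List.pyGetD
  rw [pvNegGet cs (t - 1) (by omega)]
  simp only [Option.getD_some]
  congr 1
  omega

theorem pvTrailA_eq (cs : List Char) : ∀ (t : Nat), t ≤ cs.length → ∀ (acc : List String),
    pvTrailA cs acc (-(t : Int) - 1) = acc ++ (cs.drop (cs.length - t)).map pvSing := by
  intro t
  induction t with
  | zero =>
      intro _ acc
      rw [pvTrailA, dif_neg (by omega)]
      simp
  | succ t ih =>
      intro ht acc
      rw [pvTrailA, dif_pos (by push_cast; omega)]
      rw [show -((t + 1 : Nat) : Int) - 1 + 1 = -((t + 1 : Nat) : Int) by ring,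
        pvNegGetD cs (t + 1) (by omega) ht,
        show -((t + 1 : Nat) : Int) = -(t : Int) - 1 by push_cast; ring,
        ih (by omega)]
      have hdrop : cs.drop (cs.length - (t + 1)) = cs.getD (cs.length - (t + 1)) ' ' :: cs.drop (cs.length - t) := by
        rw [show cs.length - t = cs.length - (t + 1) + 1 by omega,
          List.getD_eq_getElem cs ' ' (show cs.length - (t + 1) < cs.length by omega)]
        exact List.drop_eq_getElem_cons (show cs.length - (t + 1) < cs.length by omega)
      rw [hdrop]
      simp [pvSing]

theorem pvSplit_eq : pvSplitA = fun acc t => acc ++ pvSplitB t := by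
  funext acc t
  simp only [pvSplitA, pvSplitB]
  split_ifs <;> simp

theorem pvFoldlSplit (L : List String) : List.foldl pvSplitA [] L = L.flatMap pvSplitB := by
  rw [pvSplit_eq, PySem.List.foldl_append_eq_flatMap]
  simp

-- the trailing punctuation run never reaches back to position front
theorem pvRevBound (cs : List Char) (front : Nat) (hf : front < cs.length)
    (hnp : pvMemA (cs.getD front ' ') = false) :
    front + (cs.reverse.takeWhile pvMemA).length < cs.length := by
  by_contra h
  push_neg at h
  have hm : cs.length - 1 - front < (cs.reverse.takeWhile pvMemA).length := by
    have := (List.takeWhile_prefix (l := cs.reverse) (pvMemA)).length_le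
    simp at this
    omega
  have hmem := pvTakeWhile_getElem hm (show cs.length - 1 - front < cs.reverse.length by simp; omega)
  rw [List.getElem_reverse] at hmem
  rw [pvGetElem_idx_eq cs (show cs.length - 1 - (cs.length - 1 - front) = front by omega) (by omega)] at hmem
  rw [List.getD_eq_getElem cs ' ' hf] at hnp
  exact Bool.false_ne_true (hnp.symm.trans hmem)

theorem pvSliceNeg (cs : List Char) (f t : Nat) (hf : f ≤ cs.length) (ht : 0 < t) :
    PySem.List.slice cs (some (f : Int)) (some (-(t : Int))) = (cs.drop f).take (cs.length - t - f) := by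
  simp only [PySem.List.slice, PySem.List.clampIdx_neg_natCast cs.length t ht,
    PySem.List.clampIdx_natCast, min_eq_left hf]

-- A's stripping phase produces exactly pvPieces
theorem pvPiecesA_eq (cs : List Char) :
    (let fr := pvFrontA cs [] 0
     let char_front_idx := fr.2
     let char_last_idx := pvBackA cs char_front_idx (-1)
     if char_last_idx = -1 then
       let word := String.ofList (PySem.List.slice cs (some (char_front_idx : Int)) none)
       if word.length > 0 then fr.1 ++ [word] else fr.1
     else
       let word := String.ofList (PySem.List.slice cs (some (char_front_idx : Int)) (some (char_last_idx + 1)))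
       pvTrailA cs (fr.1 ++ [word]) char_last_idx)
    = pvPieces cs := by
  have hA := pvFrontA_eq cs [] 0
  simp only [List.drop_zero, List.nil_append, Nat.zero_add] at hA
  have hfle : (cs.takeWhile pvMemA).length ≤ cs.length := (List.takeWhile_prefix pvMemA).length_le
  simp only [hA, pvPieces, pvF, pvT]
  by_cases hfl : (cs.takeWhile pvMemA).length = cs.length
  · -- the whole token (possibly empty) is punctuation: no word, no trailing loop
    have htw : cs.takeWhile pvMemA = cs := (List.takeWhile_prefix pvMemA).eq_of_length hfl
    have hbackA : pvBackA cs (cs.takeWhile pvMemA).length (-1) = -1 := by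
      rw [pvBackA, dif_neg (fun hcon => absurd hcon.2.2 (by omega))]
    rw [hbackA, if_pos rfl, if_pos hfl]
    simp [PySem.List.slice_from_natCast, htw]
  · have hflt : (cs.takeWhile pvMemA).length < cs.length := by omega
    have hnp : pvMemA (cs.getD (cs.takeWhile pvMemA).length ' ') = false := by
      rw [List.getD_eq_getElem cs ' ' hflt]
      exact pvTakeWhile_boundary hflt
    have hft : (cs.takeWhile pvMemA).length + (cs.reverse.takeWhile pvMemA).length < cs.length :=
      pvRevBound cs _ hflt hnp
    have hbackA : pvBackA cs (cs.takeWhile pvMemA).length (-1) =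
        -((cs.reverse.takeWhile pvMemA).length : Int) - 1 := by
      have h0 := pvBackA_eq cs _ hflt hnp 0 (by omega)
      simp only [List.drop_zero, Nat.cast_zero] at h0
      rw [show (-1 : Int) = -(0 : Int) - 1 by norm_num, h0]
      ring
    rw [hbackA, if_neg hfl]
    by_cases ht : (cs.reverse.takeWhile pvMemA).length = 0
    · -- no trailing punctuation: A appends token[front:]
      rw [ht]
      rw [if_pos (show -((0 : Nat) : Int) - 1 = -1 by norm_num)]
      rw [PySem.List.slice_from_natCast cs (cs.takeWhile pvMemA).length]
      rw [if_pos (show (String.ofList (cs.drop (cs.takeWhile pvMemA).length)).length > 0 by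
        rw [String.length_ofList]; simp; omega)]
      rw [Nat.sub_zero, List.take_of_length_le (show (cs.drop (cs.takeWhile pvMemA).length).length ≤ cs.length - (cs.takeWhile pvMemA).length by rw [List.length_drop])]
      simp
    · -- trailing punctuation: A's else branch with its char-by-char loop
      rw [if_neg (show ¬(-((cs.reverse.takeWhile pvMemA).length : Int) - 1 = -1) by omega)]
      rw [show -((cs.reverse.takeWhile pvMemA).length : Int) - 1 + 1 =
        -((cs.reverse.takeWhile pvMemA).length : Int) by ring]
      rw [pvSliceNeg cs _ _ (by omega) (by omega)]
      rw [pvTrailA_eq cs _ (by omega)]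

-- B's single forward pass computes the three components of pvPieces
theorem pvFoldB_eq (cs : List Char) :
    cs.foldl pvStepB ([], [], []) =
      if pvF cs = cs.length then (cs.map pvSing, ([], []))
      else ((cs.takeWhile pvMemA).map pvSing,
            ((cs.drop (pvF cs)).take (cs.length - pvT cs - pvF cs),
             cs.drop (cs.length - pvT cs))) := by
  induction cs using List.reverseRecOn with
  | nil => simp [pvF]
  | append_singleton cs ch ih =>
      rw [List.foldl_append, List.foldl_cons, List.foldl_nil, ih]
      have hfle : pvF cs ≤ cs.length := (List.takeWhile_prefix pvMemA).length_le
      have htle : pvT cs ≤ cs.length := by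
        have h := (List.takeWhile_prefix (l := cs.reverse) pvMemA).length_le
        simpa [pvT] using h
      by_cases hfl : pvF cs = cs.length
      · have htwcs : List.takeWhile pvMemA cs = cs := (List.takeWhile_prefix pvMemA).eq_of_length hfl
        have hfl' : (List.takeWhile pvMemA cs).length = cs.length := hfl
        rw [if_pos hfl]
        cases hch : pvMemA ch with
        | true =>
            have hF' : pvF (cs ++ [ch]) = (cs ++ [ch]).length := by
              simp [pvF, List.takeWhile_append, hfl', List.takeWhile_cons, hch]
            rw [if_pos hF']
            simp [pvStepB, pvMemB_eq, hch, pvSing]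
        | false =>
            have hne : ¬ pvF (cs ++ [ch]) = (cs ++ [ch]).length := by
              simp [pvF, List.takeWhile_append, hfl', List.takeWhile_cons, hch]
            have htw' : List.takeWhile pvMemA (cs ++ [ch]) = cs := by
              rw [List.takeWhile_append, if_pos hfl']
              simp [List.takeWhile_cons, hch]
            have hF' : pvF (cs ++ [ch]) = cs.length := by simp [pvF, htw']
            have hT' : pvT (cs ++ [ch]) = 0 := by
              simp [pvT, List.reverse_append, List.takeWhile_cons, hch]
            rw [if_neg hne, htw', hF', hT']
            simp [pvStepB, pvMemB_eq, hch, htwcs, List.drop_left]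
      · have hflt : pvF cs < cs.length := lt_of_le_of_ne hfle hfl
        have hnp : pvMemA (cs.getD (pvF cs) ' ') = false := by
          rw [List.getD_eq_getElem _ ' ' hflt]
          exact pvTakeWhile_boundary hflt
        have hft : pvF cs + pvT cs < cs.length := pvRevBound cs (pvF cs) hflt hnp
        have hfl' : ¬ (List.takeWhile pvMemA cs).length = cs.length := hfl
        have htw' : List.takeWhile pvMemA (cs ++ [ch]) = List.takeWhile pvMemA cs := by
          rw [List.takeWhile_append, if_neg hfl']
        have hF' : pvF (cs ++ [ch]) = pvF cs := by simp [pvF, htw']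
        have hne : ¬ pvF (cs ++ [ch]) = (cs ++ [ch]).length := by
          rw [hF']
          simp
          omega
        have hmidne : (cs.drop (pvF cs)).take (cs.length - pvT cs - pvF cs) ≠ [] := by
          apply List.ne_nil_of_length_pos
          rw [List.length_take, List.length_drop]
          omega
        rw [if_neg hfl, if_neg hne, htw', hF']
        cases hch : pvMemA ch with
        | true =>
            have hT' : pvT (cs ++ [ch]) = pvT cs + 1 := by
              simp [pvT, List.reverse_append, List.takeWhile_cons, hch]
            have harith1 : (cs ++ [ch]).length - (pvT cs + 1) - pvF cs = cs.length - pvT cs - pvF cs := by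
              simp only [List.length_append, List.length_cons, List.length_nil]
              omega
            have harith2 : (cs ++ [ch]).length - (pvT cs + 1) = cs.length - pvT cs := by
              simp only [List.length_append, List.length_cons, List.length_nil]
              omega
            rw [hT', harith1, harith2,
              List.drop_append_of_le_length (by omega),
              List.drop_append_of_le_length (by omega),
              List.take_append_of_le_length (by rw [List.length_drop]; omega)]
            simp [pvStepB, pvMemB_eq, hch, hmidne]
        | false =>
            have hT' : pvT (cs ++ [ch]) = 0 := by
              simp [pvT, List.reverse_append, List.takeWhile_cons, hch]
            have harith1 : (cs ++ [ch]).length - 0 - pvF cs = (cs.drop (pvF cs) ++ [ch]).length := by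
              simp only [List.length_append, List.length_cons, List.length_nil, List.length_drop]
              omega
            have harith2 : (cs ++ [ch]).length - 0 = (cs ++ [ch]).length := by omega
            rw [hT', harith1, harith2,
              List.drop_append_of_le_length (by omega),
              List.take_of_length_le (le_refl _),
              List.drop_of_length_le (le_refl _)]
            have hsplit : (cs.drop (pvF cs)).take (cs.length - pvT cs - pvF cs) ++ cs.drop (cs.length - pvT cs) = cs.drop (pvF cs) := by
              have hdd : cs.drop (cs.length - pvT cs) = (cs.drop (pvF cs)).drop (cs.length - pvT cs - pvF cs) := by
                rw [List.drop_drop]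
                congr 1
                omega
              rw [hdd, List.take_append_drop]
            simp [pvStepB, pvMemB_eq, hch, hsplit]

theorem pvEndswith_sing_false (c : Char) (p : List Char) (hp : 1 < p.length) :
    PySem.Chars.endswith [c] p = false := by
  rw [Bool.eq_false_iff]
  intro h
  rw [PySem.Chars.endswith_iff] at h
  have := h.length_le
  simp at this
  omega

theorem pvSing_ne_cannot (c : Char) : (String.ofList [c] == "cannot") = false := by
  rw [beq_eq_false_iff_ne]
  intro h
  have := congrArg String.toList h
  simp [String.toList_ofList] at this

theorem pvSplitB_sing (c : Char) : pvSplitB (pvSing c) = [pvSing c] := by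
  simp [pvSplitB, pvSing, pvEndswith_sing_false, pvSing_ne_cannot]

theorem pvFlatMap_sing (xs : List Char) : (xs.map pvSing).flatMap pvSplitB = xs.map pvSing := by
  induction xs with
  | nil => simp
  | cons c xs ih => simp [pvSplitB_sing, ih]

-- ===== VERDICT (by name: the statement is the Claim_ definition above) =====
theorem get_word_syns_spec : Claim_equal_get_word_syns := by
  intro token _
  show get_word_syns token = get_word_syns_alt token
  have hA : get_word_syns token = (pvPieces token.toList).flatMap pvSplitB := by
    show List.foldl pvSplitA [] _ = _
    rw [pvFoldlSplit, pvPiecesA_eq]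
  rw [hA]
  show _ = (let st := token.toList.foldl pvStepB ([], [], [])
    st.1 ++ (if st.2.1 ≠ [] then pvSplitB (String.ofList st.2.1) else []) ++ st.2.2.map (fun c => String.ofList [c]))
  rw [pvFoldB_eq, pvPieces]
  by_cases hfl : pvF token.toList = token.toList.length
  · simp only [hfl, ite_true]
    simp [pvFlatMap_sing]
  · have hflt : pvF token.toList < token.toList.length :=
      lt_of_le_of_ne (List.takeWhile_prefix pvMemA).length_le hfl
    have hnp : pvMemA (token.toList.getD (pvF token.toList) ' ') = false := by
      rw [List.getD_eq_getElem _ ' ' hflt]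
      exact pvTakeWhile_boundary hflt
    have hft := pvRevBound token.toList (pvF token.toList) hflt hnp
    have hmidlen : ((token.toList.drop (pvF token.toList)).take (token.toList.length - pvT token.toList - pvF token.toList)).length = token.toList.length - pvT token.toList - pvF token.toList := by
      rw [List.length_take, List.length_drop]
      unfold pvT at hft ⊢
      omega
    have hmidne : (token.toList.drop (pvF token.toList)).take (token.toList.length - pvT token.toList - pvF token.toList) ≠ [] := by
      apply List.ne_nil_of_length_pos
      rw [hmidlen]
      unfold pvT at hft ⊢
      omega
    rw [if_neg hfl, if_neg hfl]
    simp only [hmidne, ne_eq, not_false_iff, if_true]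
    rw [List.flatMap_append, List.flatMap_append, pvFlatMap_sing, pvFlatMap_sing]
    simp only [List.flatMap_cons, List.flatMap_nil, List.append_nil]
    rfl
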